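-- pv_equiv track=rewrite | github.com/tsalh/Sharded_KVS | rest.py | assignShardMembers
-- ===== SOURCE A (Python) =====
-- def assignShardMembers(sys_view, shard_count):
--     if shard_count == 0:
--         return [[]]
--     view = list(sys_view.keys())
--     view.sort()
--     shard_members = [[] for i in range(shard_count)]
--     shard_id = 0
--     for replica in view:
--         shard_members[shard_id].append(replica)
--         shard_id += 1
--         if shard_id == shard_count:
--             shard_id = 0
--     return shard_members
-- ===== SOURCE B (Python) =====
-- def assignShardMembers(sys_view, shard_count):
--     if shard_count == 0:
--         return [[]]
--     view = sorted(sys_view.keys())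
--     return [view[i::shard_count] for i in range(shard_count)]
-- ===== Notes on version B (the rewrite author's own statement) =====
-- stated objective: idiomatic
-- what changed: Replaces the single pass with a mutable rotating shard_id counter by building each shard directly as the strided slice view[i::shard_count] of the sorted keys.
import Mathlib
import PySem

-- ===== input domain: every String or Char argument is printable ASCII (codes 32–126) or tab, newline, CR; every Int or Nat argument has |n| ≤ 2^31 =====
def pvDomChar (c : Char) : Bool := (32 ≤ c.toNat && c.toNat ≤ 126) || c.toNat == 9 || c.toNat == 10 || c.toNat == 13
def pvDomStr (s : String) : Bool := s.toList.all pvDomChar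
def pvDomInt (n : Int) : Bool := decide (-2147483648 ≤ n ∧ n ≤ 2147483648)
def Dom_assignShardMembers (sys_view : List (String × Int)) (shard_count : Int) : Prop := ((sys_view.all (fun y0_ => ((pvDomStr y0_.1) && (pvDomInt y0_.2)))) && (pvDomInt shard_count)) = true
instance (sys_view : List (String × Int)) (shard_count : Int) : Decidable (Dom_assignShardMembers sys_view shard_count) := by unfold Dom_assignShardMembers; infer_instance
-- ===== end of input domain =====

-- B builds shard i as the strided slice view[i::shard_count] of the sorted keys, instead of
-- A's one-pass dispatch with a rotating shard_id counter (objective: idiomatic).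

-- ===== PORT A =====
def assignShardMembers (sys_view : List (String × Int)) (shard_count : Int) : List (List String) :=
  if shard_count == 0 then [[]] else
  let view := PySem.List.sorted (PySem.Dict.ofList sys_view).keys (fun x => x) false
  let shard_members : List (List String) :=
    (PySem.List.pyRange 0 shard_count 1).map (fun _ => ([] : List String))
  -- shard_id is a nonnegative rotating counter, so `.toNat` is the exact Python index here
  let r := view.foldl (fun (st : List (List String) × Int) replica =>
      (st.1.modify st.2.toNat (fun l => l ++ [replica]),
       if st.2 + 1 == shard_count then 0 else st.2 + 1)) (shard_members, 0)
  r.1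

-- ===== PORT B =====
def assignShardMembers_alt (sys_view : List (String × Int)) (shard_count : Int) : List (List String) :=
  if shard_count == 0 then [[]] else
  let view := PySem.List.sorted (PySem.Dict.ofList sys_view).keys (fun x => x) false
  -- view[i::shard_count]: slice? is none only for step 0, excluded by the guard, so getD [] never fires
  (PySem.List.pyRange 0 shard_count 1).map (fun i =>
    (PySem.List.slice? view (some i) none shard_count).getD [])

-- ===== PRECONDITION & SPEC =====
-- Pre_ excludes negative shard_count with a non-empty view: there A raises IndexError.
def Pre_assignShardMembers (sys_view : List (String × Int)) (shard_count : Int) : Prop :=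
  shard_count < 0 → sys_view = []
instance (sys_view : List (String × Int)) (shard_count : Int) : Decidable (Pre_assignShardMembers sys_view shard_count) := by unfold Pre_assignShardMembers; infer_instance
def pvWitness_assignShardMembers : (List (String × Int)) × Int := ([("b", 1), ("a", 2), ("c", 3)], 2)

def Spec_assignShardMembers (sys_view : List (String × Int)) (shard_count : Int) (out : List (List String)) : Prop := out = assignShardMembers_alt sys_view shard_count
instance (sys_view : List (String × Int)) (shard_count : Int) (out : List (List String)) : Decidable (Spec_assignShardMembers sys_view shard_count out) := by unfold Spec_assignShardMembers; infer_instance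

-- ===== CLAIM (what is proved, stated in full; the proofs are below) =====
def Claim_equal_assignShardMembers : Prop := ∀ (sys_view : List (String × Int)) (shard_count : Int), Dom_assignShardMembers sys_view shard_count → Pre_assignShardMembers sys_view shard_count → Spec_assignShardMembers sys_view shard_count (assignShardMembers sys_view shard_count)

-- ===== LEMMAS AND PROOFS =====

-- shard i's final content, as the fold distributes it: keys whose enumeration index ≡ i (mod n)
def pvShard (n : Int) (l : List String) (s i : Int) : List String :=
  (PySem.List.enumerate l s).filterMap (fun jk =>
    if PySem.Int.mod jk.1 n == i then some jk.2 else none)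

lemma pvShard_nil (n s i : Int) : pvShard n [] s i = [] := by
  simp [pvShard, PySem.List.enumerate]

lemma pvShard_cons (n : Int) (a : String) (t : List String) (s i : Int) :
    pvShard n (a :: t) s i =
      (if PySem.Int.mod s n == i then [a] else []) ++ pvShard n t (s + 1) i := by
  simp only [pvShard, PySem.List.enumerate_cons, List.filterMap_cons]
  split <;> simp_all

lemma modify_map_pyRange (n : Int) (g : Int → List String) (s : Int)
    (hs0 : 0 ≤ s) (_hsn : s < n) (f : List String → List String) :
    ((PySem.List.pyRange 0 n 1).map g).modify s.toNat f
      = (PySem.List.pyRange 0 n 1).map (fun i => if i = s then f (g i) else g i) := by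
  apply List.ext_getElem
  · simp [List.length_modify]
  · intro k h1 h2
    rw [List.getElem_modify]
    simp only [List.getElem_map, PySem.List.getElem_pyRange_one]
    split_ifs with h3 h4 h4 <;> first | rfl | omega

-- elements of l at positions i, i + n', i + 2*n', …
def strideL : List String → Nat → Nat → List String
  | [], _, _ => []
  | a :: t, 0, n' => a :: strideL t (n' - 1) n'
  | _ :: t, i + 1, n' => strideL t i n'

lemma strideL_nil (i n' : Nat) : strideL [] i n' = [] := rfl

lemma strideL_eq_nil_of_le : ∀ (l : List String) (i n' : Nat), l.length ≤ i → strideL l i n' = [] := by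
  intro l
  induction l with
  | nil => intro i n' _; rfl
  | cons a t ih =>
    intro i n' h
    cases i with
    | zero => simp at h
    | succ i => exact ih i n' (by simpa using h)

lemma strideL_eq_filterMap_range : ∀ (l : List String) (i c n' : Nat), 0 < n' →
    (∀ k, i + n' * k < l.length → k < c) →
    (List.range c).filterMap (fun k => l[i + n' * k]?) = strideL l i n' := by
  intro l
  induction l with
  | nil => intro i c n' _ _; simp [strideL_nil]
  | cons a t ih =>
    intro i c n' hn hc
    cases i with
    | zero =>
      have h0 : 0 < c := hc 0 (by simp only [Nat.mul_zero, Nat.add_zero, List.length_cons]; omega)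
      obtain ⟨c', rfl⟩ : ∃ c', c = c' + 1 := ⟨c - 1, by omega⟩
      rw [List.range_succ_eq_map, List.filterMap_cons, List.filterMap_map]
      simp only [Nat.mul_zero, Nat.add_zero, List.getElem?_cons_zero, strideL]
      congr 1
      have hfun : ((fun k => (a :: t)[0 + n' * k]?) ∘ Nat.succ) = (fun k => t[(n' - 1) + n' * k]?) := by
        funext k
        have he : 0 + n' * (k + 1) = ((n' - 1) + n' * k) + 1 := by
          have : n' * (k + 1) = n' * k + n' := by ring
          omega
        simp only [Function.comp, Nat.succ_eq_add_one, he, List.getElem?_cons_succ]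
      rw [hfun]
      exact ih (n' - 1) c' n' hn (fun k hk => by
        have hlen : 0 + n' * (k + 1) < (a :: t).length := by
          simp only [List.length_cons]
          have : n' * (k + 1) = n' * k + n' := by ring
          omega
        have := hc (k + 1) hlen
        omega)
    | succ i =>
      simp only [strideL]
      have hfun : (fun k => (a :: t)[(i + 1) + n' * k]?) = (fun k => t[i + n' * k]?) := by
        funext k
        rw [show (i + 1) + n' * k = (i + n' * k) + 1 by omega, List.getElem?_cons_succ]
      rw [hfun]
      exact ih i c n' hn (fun k hk => hc k (by simp only [List.length_cons]; omega))

lemma pvShard_eq_stride (n : Int) (hn : 0 < n) {i : Int} (hi0 : 0 ≤ i) (hin : i < n) :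
    ∀ (l : List String) (s : Int),
    pvShard n l s i = strideL l (((i - s) % n).toNat) n.toNat := by
  intro l
  induction l with
  | nil => intro s; simp [pvShard_nil, strideL_nil]
  | cons a t ih =>
    intro s
    rw [pvShard_cons, PySem.Int.mod_eq_emod_of_pos hn]
    have him : i % n = i := Int.emod_eq_of_lt hi0 hin
    have hm0 : 0 ≤ (i - s) % n := Int.emod_nonneg _ (by omega)
    have hmlt : (i - s) % n < n := Int.emod_lt_of_pos _ hn
    have hiff : (i - s) % n = 0 ↔ s % n = i := by
      have hsub : (i - s) % n = (i - s % n) % n := by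
        rw [Int.sub_emod i s n, Int.sub_emod i (s % n) n, Int.emod_emod_of_dvd s dvd_rfl]
      have hs0 : 0 ≤ s % n := Int.emod_nonneg _ (by omega)
      have hsn' : s % n < n := Int.emod_lt_of_pos _ hn
      constructor
      · intro h
        rw [hsub] at h
        by_cases hd : 0 ≤ i - s % n
        · have := Int.emod_eq_of_lt hd (show i - s % n < n by omega)
          omega
        · exfalso
          have he : (i - s % n + n * 1) % n = (i - s % n) % n :=
            Int.add_mul_emod_self_left (i - s % n) n 1
          have h2 : (i - s % n + n * 1) % n = i - s % n + n * 1 :=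
            Int.emod_eq_of_lt (by omega) (by omega)
          omega
      · intro h
        rw [hsub, h]
        simp
    have hstep : (i - (s + 1)) % n = ((i - s) % n - 1) % n := by
      have h1 : i - (s + 1) = (i - s) - 1 := by ring
      have hA := Int.sub_emod (i - s) 1 n
      have hB := Int.sub_emod ((i - s) % n) 1 n
      rw [Int.emod_emod_of_dvd (i - s) dvd_rfl] at hB
      rw [h1, hA, ← hB]
    by_cases h : s % n = i
    · have h1 : (i - s) % n = 0 := hiff.mpr h
      have h2 : (i - (s + 1)) % n = n - 1 := by
        rw [hstep, h1]
        have he : ((0 : Int) - 1 + n * 1) % n = (0 - 1) % n :=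
          Int.add_mul_emod_self_left (0 - 1) n 1
        have he2 : ((0 : Int) - 1 + n * 1) % n = 0 - 1 + n * 1 :=
          Int.emod_eq_of_lt (by omega) (by omega)
        omega
      rw [ih (s + 1), h1, h2]
      simp only [h, BEq.rfl, if_true]
      rw [show ((0 : Int)).toNat = 0 from rfl, show (n - 1).toNat = n.toNat - 1 by omega]
      rfl
    · have h1 : (i - s) % n ≠ 0 := fun he => h (hiff.mp he)
      have h2 : (i - (s + 1)) % n = (i - s) % n - 1 := by
        rw [hstep]
        exact Int.emod_eq_of_lt (by omega) (by omega)
      obtain ⟨m, hm⟩ : ∃ m, ((i - s) % n).toNat = m + 1 := ⟨((i - s) % n).toNat - 1, by omega⟩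
      rw [ih (s + 1), h2, hm, show ((i - s) % n - 1).toNat = m by omega]
      have hbeq : (s % n == i) = false := by simp [h]
      rw [hbeq]
      rfl

lemma pvShard_congr (n : Int) (hn : 0 < n) (t : List String) : ∀ (s s' i : Int),
    s % n = s' % n → pvShard n t s i = pvShard n t s' i := by
  induction t with
  | nil => intro s s' i _; simp [pvShard_nil]
  | cons a t ih =>
    intro s s' i h
    rw [pvShard_cons, pvShard_cons,
        PySem.Int.mod_eq_emod_of_pos hn, PySem.Int.mod_eq_emod_of_pos hn, h,
        ih (s + 1) (s' + 1) i (by rw [Int.add_emod, Int.add_emod s', h])]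

lemma fold_eq_shards (n : Int) (hn : 0 < n) (view : List String) :
    ∀ (s : Int), 0 ≤ s → s < n → ∀ (g : Int → List String),
    (view.foldl (fun (st : List (List String) × Int) replica =>
        (st.1.modify st.2.toNat (fun l => l ++ [replica]),
         if st.2 + 1 == n then 0 else st.2 + 1)) ((PySem.List.pyRange 0 n 1).map g, s)).1
      = (PySem.List.pyRange 0 n 1).map (fun i => g i ++ pvShard n view s i) := by
  induction view with
  | nil => intro s _ _ g; simp [pvShard_nil]
  | cons a t ih =>
    intro s hs0 hsn g
    rw [List.foldl_cons]
    have hsmod : PySem.Int.mod s n = s := by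
      rw [PySem.Int.mod_eq_emod_of_pos hn]; exact Int.emod_eq_of_lt hs0 hsn
    have hs'0 : 0 ≤ (if s + 1 == n then 0 else s + 1) := by split <;> omega
    have hs'n : (if s + 1 == n then 0 else s + 1) < n := by
      split
      · omega
      · rename_i h; simp only [beq_iff_eq] at h; omega
    have hs'mod : (s + 1) % n = (if s + 1 == n then (0:Int) else s + 1) % n := by
      split
      · rename_i h; simp only [beq_iff_eq] at h; rw [h]; simp
      · rfl
    show (t.foldl _ (((PySem.List.pyRange 0 n 1).map g).modify s.toNat (fun l => l ++ [a]),
          if s + 1 == n then 0 else s + 1)).1 = _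
    rw [modify_map_pyRange n g s hs0 hsn (fun l => l ++ [a])]
    rw [ih _ hs'0 hs'n _]
    apply List.map_congr_left
    intro i _
    rw [pvShard_cons, hsmod, pvShard_congr n hn t (s + 1) _ i hs'mod]
    by_cases h : i = s
    · subst h; simp
    · have hne : (s == i) = false := by simp [Ne.symm h]
      simp [h, hne]

lemma slice?_stride (l : List String) (i n : Int) (hi : 0 ≤ i) (hn : 0 < n) :
    PySem.List.slice? l (some i) none n = some (strideL l i.toNat n.toNat) := by
  simp only [PySem.List.slice?, PySem.List.sliceIndices]
  rw [if_neg (by omega : ¬ n = 0)]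
  simp only [if_neg (show ¬ n < 0 by omega), if_neg (show ¬ i < 0 by omega), if_pos hn]
  congr 1
  by_cases hle : i ≤ (l.length : Int)
  · have hmin : min i (l.length : Int) = i := min_eq_left hle
    rw [hmin]
    have hfun : (fun k : Nat => l[(i + n * (k : Int)).toNat]?)
        = (fun k : Nat => l[i.toNat + n.toNat * k]?) := by
      funext k
      congr 1
      have h2 : (i.toNat : Int) = i := by omega
      have h3 : (n.toNat : Int) = n := by omega
      have hcast : i + n * (k : Int) = ((i.toNat + n.toNat * k : Nat) : Int) := by
        push_cast
        rw [h2, h3]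
      rw [hcast, Int.toNat_natCast]
    rw [hfun]
    apply strideL_eq_filterMap_range l i.toNat _ n.toNat (by omega)
    intro k hk
    have hilt : i < (l.length : Int) := by omega
    rw [if_pos hilt]
    have hk' : i + n * (k : Int) < (l.length : Int) := by
      have h1 : (i.toNat : Int) + (n.toNat : Int) * (k : Int) < (l.length : Int) := by
        exact_mod_cast Nat.cast_lt.mpr hk
      have h2 : (i.toNat : Int) = i := by omega
      have h3 : (n.toNat : Int) = n := by omega
      rw [h2, h3] at h1
      exact h1
    have hdiv : (k : Int) + 1 ≤ ((l.length : Int) - i + n - 1) / n := by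
      rw [Int.le_ediv_iff_mul_le hn]
      have : ((k : Int) + 1) * n = n * (k : Int) + n := by ring
      rw [this]
      omega
    generalize hD : ((l.length : Int) - i + n - 1) / n = D at hdiv ⊢
    omega
  · have hmin : min i (l.length : Int) = (l.length : Int) := min_eq_right (by omega)
    rw [hmin, if_neg (by omega)]
    rw [List.range_zero, List.filterMap_nil, strideL_eq_nil_of_le l i.toNat n.toNat (by omega)]

lemma assign_eq (sys_view : List (String × Int)) (shard_count : Int)
    (hpre : Pre_assignShardMembers sys_view shard_count) :
    assignShardMembers sys_view shard_count = assignShardMembers_alt sys_view shard_count := by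
  unfold assignShardMembers assignShardMembers_alt
  by_cases h0 : shard_count = 0
  · simp [h0]
  · rw [if_neg (by simpa using h0), if_neg (by simpa using h0)]
    by_cases hneg : shard_count < 0
    · have hv : sys_view = [] := hpre hneg
      subst hv
      have hr : PySem.List.pyRange 0 shard_count 1 = [] :=
        PySem.List.pyRange_one_eq_nil (by omega)
      simp [hr,
        show PySem.List.sorted (PySem.Dict.ofList ([] : List (String × Int))).keys
            (fun x => x) false = [] from rfl]
    · have hn : 0 < shard_count := by omega
      rw [fold_eq_shards shard_count hn _ 0 le_rfl hn (fun _ => [])]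
      apply List.map_congr_left
      intro i hi
      rw [PySem.List.mem_pyRange_one] at hi
      rw [slice?_stride _ i shard_count hi.1 hn]
      rw [pvShard_eq_stride shard_count hn hi.1 hi.2 _ 0,
        show (i - 0) % shard_count = i from by
          rw [Int.sub_zero]; exact Int.emod_eq_of_lt hi.1 hi.2]
      simp

-- ===== VERDICT (by name: the statement is the Claim_ definition above) =====
theorem assignShardMembers_spec : Claim_equal_assignShardMembers := by
  intro sys_view shard_count _ hpre
  unfold Spec_assignShardMembers
  exact assign_eq sys_view shard_count hpre
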